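-- pv_equiv track=rewrite | github.com/afigzb/LatentTerm-zh | core/_pattern_miner.py | _align_to_vocab
-- ===== SOURCE A (Python) =====
-- def _align_to_vocab(w: str, vocab: set[str]) -> str | None:
--     """候选池对齐：若 w 含有 vocab 内的子串，返回其中**最长且右对齐优先**的那个。
--
--     策略：从长到短枚举，对每个长度从右往左扫（因为实体通常在词组右端），
--     一命中即返回。对齐后的词比原 w 更精确（消除前缀吃入）。
--
--     如果 w 完全匹配，直接返回 w。如果没有子串命中，返回 None（调用方决定
--     是否接受原 w——对"完全新词"应当接受）。
--     """
--     if w in vocab: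
--         return w
--     n = len(w)
--     for length in range(min(n, 6), 1, -1):
--         for start in range(n - length, -1, -1):
--             sub = w[start:start + length]
--             if sub in vocab:
--                 return sub
--     return None
-- ===== SOURCE B (Python) =====
-- def _align_to_vocab(w: str, vocab: set[str]) -> str | None:
--     """Same result as A: exhaustively enumerate all (length, start) hits in one
--     flat comprehension and pick the lexicographic max, instead of A's
--     priority-ordered nested scan with early return."""
--     if w in vocab:
--         return w
--     n = len(w)
--     cands = [(length, start)
--              for length in range(2, min(n, 6) + 1)
--              for start in range(n - length + 1)
--              if w[start:start + length] in vocab]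
--     if not cands:
--         return None
--     length, start = max(cands)
--     return w[start:start + length]
-- ===== Notes on version B (the rewrite author's own statement) =====
-- stated objective: simpler
-- what changed: Replaced A's priority-ordered nested loop (lengths descending, starts descending, early return on first hit) by one flat comprehension enumerating every (length, start) hit and a single max() over the (length, start) tuples.
import Mathlib
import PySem

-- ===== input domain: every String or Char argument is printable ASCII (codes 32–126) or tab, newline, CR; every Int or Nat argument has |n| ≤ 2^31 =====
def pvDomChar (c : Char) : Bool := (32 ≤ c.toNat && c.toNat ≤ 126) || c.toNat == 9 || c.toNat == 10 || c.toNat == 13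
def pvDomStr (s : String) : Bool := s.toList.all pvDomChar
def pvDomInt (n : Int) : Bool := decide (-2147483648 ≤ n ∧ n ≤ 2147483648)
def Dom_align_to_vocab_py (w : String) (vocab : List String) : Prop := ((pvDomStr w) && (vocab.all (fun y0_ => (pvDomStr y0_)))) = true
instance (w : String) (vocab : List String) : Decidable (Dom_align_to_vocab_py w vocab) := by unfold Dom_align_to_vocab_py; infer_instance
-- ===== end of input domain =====

-- B replaces A's priority-ordered nested scan with early return by a flat
-- enumeration of all (length, start) hits plus a lexicographic max (simpler decomposition, same cost class).

-- ===== PORT A =====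
-- inner loop: 'for start in range(n - length, -1, -1): … return sub' as structural recursion on the range list
def pvAInner (w : String) (vocab : List String) (length : Int) : List Int → Option String
  | [] => none
  | start :: rest =>
      let sub := PySem.Str.slice w (some start) (some (start + length))
      if vocab.contains sub then some sub else pvAInner w vocab length rest

-- outer loop: 'for length in range(min(n, 6), 1, -1): …' with the inner early return propagated
def pvAOuter (w : String) (vocab : List String) (n : Int) : List Int → Option String
  | [] => none
  | length :: rest =>
      match pvAInner w vocab length (PySem.List.pyRange (n - length) (-1) (-1)) with
      | some r => some r
      | none => pvAOuter w vocab n rest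

def align_to_vocab_py (w : String) (vocab : List String) : Option String :=
  if vocab.contains w then some w
  else
    let n := PySem.Str.len w
    pvAOuter w vocab n (PySem.List.pyRange (min n 6) 1 (-1))

-- ===== PORT B =====
-- the flat comprehension: [(length, start) for length in … for start in … if sub in vocab]
def pvCands (w : String) (vocab : List String) (n : Int) : List (Int × Int) :=
  (PySem.List.pyRange 2 (min n 6 + 1) 1).flatMap (fun length =>
    ((PySem.List.pyRange 0 (n - length + 1) 1).filter (fun start =>
        vocab.contains (PySem.Str.slice w (some start) (some (start + length))))).map
      (fun start => (length, start)))

def align_to_vocab_py_alt (w : String) (vocab : List String) : Option String :=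
  if vocab.contains w then some w
  else
    let n := PySem.Str.len w
    match PySem.List.max2? (pvCands w vocab n) (fun c => c.1) (fun c => c.2) with
    | none => none
    | some (length, start) => some (PySem.Str.slice w (some start) (some (start + length)))

-- ===== PRECONDITION & SPEC =====
def Spec_align_to_vocab_py (w : String) (vocab : List String) (out : Option String) : Prop := out = align_to_vocab_py_alt w vocab
instance (w : String) (vocab : List String) (out : Option String) : Decidable (Spec_align_to_vocab_py w vocab out) := by unfold Spec_align_to_vocab_py; infer_instance

-- ===== CLAIM (what is proved, stated in full; the proofs are below) =====
def Claim_equal_align_to_vocab_py : Prop := ∀ (w : String) (vocab : List String), Dom_align_to_vocab_py w vocab → Spec_align_to_vocab_py w vocab (align_to_vocab_py w vocab)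

-- ===== LEMMAS AND PROOFS =====

-- strict lexicographic order on (length, start) pairs, as Python's tuple '<'
def pvLexLt (a b : Int × Int) : Prop := a.1 < b.1 ∨ (a.1 = b.1 ∧ a.2 < b.2)

-- the hit test shared by both ports
def pvHit (w : String) (vocab : List String) (length start : Int) : Bool :=
  vocab.contains (PySem.Str.slice w (some start) (some (start + length)))

def pvSub (w : String) (c : Int × Int) : String :=
  PySem.Str.slice w (some c.2) (some (c.2 + c.1))

-- A's inner scan returns the first hit of its start list
theorem pvAInner_eq (w : String) (vocab : List String) (L : Int) (ss : List Int) :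
    pvAInner w vocab L ss =
      ((ss.filter (pvHit w vocab L)).map (fun s => ((L, s) : Int × Int))).head?.map (pvSub w) := by
  induction ss with
  | nil => rfl
  | cons s rest ih =>
      simp only [pvAInner, List.filter_cons, pvHit]
      split_ifs with h
      · simp [pvSub]
      · exact ih

-- A's nested scan returns the first hit of the flattened candidate list
theorem pvAOuter_eq (w : String) (vocab : List String) (n : Int) (Ls : List Int) :
    pvAOuter w vocab n Ls =
      (Ls.flatMap (fun L =>
        ((PySem.List.pyRange (n - L) (-1) (-1)).filter (pvHit w vocab L)).map
          (fun s => ((L, s) : Int × Int)))).head?.map (pvSub w) := by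
  induction Ls with
  | nil => rfl
  | cons L rest ih =>
      simp only [pvAOuter, pvAInner_eq, List.flatMap_cons, List.head?_append]
      cases hh : (((PySem.List.pyRange (n - L) (-1) (-1)).filter (pvHit w vocab L)).map
          (fun s => ((L, s) : Int × Int))).head? with
      | some c => simp
      | none => simp [ih]

-- A's descending candidate order is the reverse of B's ascending one
theorem pvHits_reverse (w : String) (vocab : List String) (n : Int) :
    ((PySem.List.pyRange (min n 6) 1 (-1)).flatMap (fun L =>
        ((PySem.List.pyRange (n - L) (-1) (-1)).filter (pvHit w vocab L)).map
          (fun s => ((L, s) : Int × Int)))) = (pvCands w vocab n).reverse := by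
  unfold pvCands
  rw [PySem.List.pyRange_neg_one_eq_reverse (min n 6) 1, List.reverse_flatMap]
  norm_num
  congr 1
  funext L
  rw [PySem.List.pyRange_neg_one_eq_reverse (n - L) (-1)]
  norm_num [Function.comp, List.filter_reverse, List.map_reverse]
  congr 2
  funext start
  simp [pvHit]

-- max2?'s fold step, named so the induction can rewrite it
def pvStep (acc : Option (Int × Int)) (x : Int × Int) : Option (Int × Int) :=
  match acc with
  | none => some x
  | some m =>
      if (decide (m.1 < x.1) || !decide (x.1 < m.1) && decide (m.2 < x.2)) = true
      then some x else some m

theorem pvMax2_eq_foldl (xs : List (Int × Int)) :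
    PySem.List.max2? xs (fun c => c.1) (fun c => c.2) = List.foldl pvStep none xs := by
  unfold PySem.List.max2?
  congr 1
  funext acc x
  cases acc <;> rfl

theorem pvFoldl_chain (xs : List (Int × Int)) (m : Int × Int)
    (h : List.Pairwise pvLexLt (m :: xs)) :
    List.foldl pvStep (some m) xs = some (xs.getLastD m) := by
  induction xs generalizing m with
  | nil => rfl
  | cons x rest ih =>
      have hmx : pvLexLt m x := (List.pairwise_cons.mp h).1 x (by simp)
      have hrest : List.Pairwise pvLexLt (x :: rest) := (List.pairwise_cons.mp h).2
      have hc : (decide (m.1 < x.1) || !decide (x.1 < m.1) && decide (m.2 < x.2)) = true := by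
        rcases hmx with h1 | ⟨h1, h2⟩ <;> simp <;> omega
      simp only [List.foldl_cons, pvStep, hc, if_true, List.getLastD_cons]
      exact ih x hrest

-- max2? of a strictly lex-increasing list is its last element
theorem pvMax2_eq_getLast? (xs : List (Int × Int)) (h : List.Pairwise pvLexLt xs) :
    PySem.List.max2? xs (fun c => c.1) (fun c => c.2) = xs.getLast? := by
  cases xs with
  | nil => rfl
  | cons m rest =>
      rw [pvMax2_eq_foldl]
      simp only [List.foldl_cons]
      rw [show pvStep none m = some m from rfl, pvFoldl_chain rest m h,
          List.getLast?_cons, List.getLastD_eq_getLast?]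

-- B's candidate list is strictly lex-increasing
theorem pvCands_pairwise (w : String) (vocab : List String) (n : Int) :
    List.Pairwise pvLexLt (pvCands w vocab n) := by
  unfold pvCands
  rw [List.flatMap_def, List.pairwise_flatten]
  constructor
  · intro l hl
    rcases List.mem_map.mp hl with ⟨L, _, rfl⟩
    refine List.Pairwise.map _ (fun a b hab => ?_)
      ((PySem.List.pairwise_lt_pyRange_one 0 (n - L + 1)).filter _)
    exact Or.inr ⟨rfl, hab⟩
  · rw [List.pairwise_map]
    refine (PySem.List.pairwise_lt_pyRange_one 2 (min n 6 + 1)).imp ?_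
    intro L1 L2 hlt x hx y hy
    rcases List.mem_map.mp hx with ⟨s, _, rfl⟩
    rcases List.mem_map.mp hy with ⟨t, _, rfl⟩
    exact Or.inl hlt

-- assemble
theorem pvMain (w : String) (vocab : List String) :
    align_to_vocab_py w vocab = align_to_vocab_py_alt w vocab := by
  unfold align_to_vocab_py align_to_vocab_py_alt
  by_cases hw : vocab.contains w = true
  · rw [if_pos hw, if_pos hw]
  · rw [if_neg hw, if_neg hw]
    show pvAOuter w vocab (PySem.Str.len w) (PySem.List.pyRange (min (PySem.Str.len w) 6) 1 (-1)) =
      match PySem.List.max2? (pvCands w vocab (PySem.Str.len w)) (fun c => c.1) (fun c => c.2) with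
      | none => none
      | some (length, start) => some (PySem.Str.slice w (some start) (some (start + length)))
    rw [pvAOuter_eq, pvHits_reverse, List.head?_reverse,
        pvMax2_eq_getLast? _ (pvCands_pairwise w vocab (PySem.Str.len w))]
    cases hg : (pvCands w vocab (PySem.Str.len w)).getLast? with
    | none => rfl
    | some c => cases c; simp [pvSub]

-- ===== VERDICT (by name: the statement is the Claim_ definition above) =====
theorem align_to_vocab_py_spec : Claim_equal_align_to_vocab_py := by
  intro w vocab _
  unfold Spec_align_to_vocab_py
  exact pvMain w vocab
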